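-- pv_equiv track=rewrite | github.com/clairedubin/pangenome_cervical_dysplasia_analysis | cervical_dysplasia/microSLAM/NCBI_isolates/gbff_reverser.py | split_into_contigs
-- ===== SOURCE A (Python) =====
-- from typing import List, Tuple, Optional
--
-- def split_into_contigs(lines: List[str]) -> List[List[str]]:
--     """Split the file into individual contigs based on LOCUS lines."""
--     contigs = []
--     current_contig = []
--
--     for line in lines:
--         if line.startswith('LOCUS') and current_contig:
--             # Start of new contig, save previous one
--             contigs.append(current_contig)
--             current_contig = [line]
--         else:
--             current_contig.append(line)
--
--     # Add the last contig
--     if current_contig: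
--         contigs.append(current_contig)
--
--     return contigs
-- ===== SOURCE B (Python) =====
-- def split_into_contigs(lines):
--     """Split the file into individual contigs based on LOCUS lines."""
--     contigs = []
--     i = 0
--     n = len(lines)
--     while i < n:
--         # find the next cut point: first LOCUS line strictly after i
--         j = i + 1
--         while j < n and not lines[j].startswith('LOCUS'):
--             j += 1
--         contigs.append(lines[i:j])
--         i = j
--     return contigs
-- ===== Notes on version B (the rewrite author's own statement) =====
-- stated objective: alternative
-- what changed: Replaces the accumulate-and-flush loop over a (contigs, current_contig) state with a recursive find-next-LOCUS-cut-then-slice decomposition.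
import Mathlib
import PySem

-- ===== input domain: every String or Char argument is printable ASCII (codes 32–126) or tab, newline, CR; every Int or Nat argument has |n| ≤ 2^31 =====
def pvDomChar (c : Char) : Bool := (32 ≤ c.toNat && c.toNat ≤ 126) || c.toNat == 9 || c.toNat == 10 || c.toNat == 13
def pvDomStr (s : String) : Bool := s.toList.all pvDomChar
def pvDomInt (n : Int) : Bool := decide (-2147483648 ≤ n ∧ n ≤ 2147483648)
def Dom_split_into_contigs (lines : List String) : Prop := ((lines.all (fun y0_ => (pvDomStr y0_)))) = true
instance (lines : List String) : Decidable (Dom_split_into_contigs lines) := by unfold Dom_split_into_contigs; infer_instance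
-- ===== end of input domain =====

-- B replaces A's accumulate-and-flush loop with a recursive find-cut-then-slice decomposition (alternative, same cost).

-- ===== PORT A =====
-- one loop step of A: state is (contigs, current_contig)
def pvStepA (st : List (List String) × List String) (line : String) : List (List String) × List String :=
  if PySem.Str.startswith line "LOCUS" && !st.2.isEmpty then
    (st.1 ++ [st.2], [line])
  else
    (st.1, st.2 ++ [line])

def split_into_contigs (lines : List String) : List (List String) :=
  let st := lines.foldl pvStepA ([], [])
  if st.2.isEmpty then st.1 else st.1 ++ [st.2]

-- ===== PORT B =====
-- B's inner while loop: number of leading lines after the cut that do not start with LOCUS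
def pvScan (rest : List String) : Nat :=
  match rest with
  | [] => 0
  | y :: ys => if PySem.Str.startswith y "LOCUS" then 0 else pvScan ys + 1

-- B's outer while loop, as recursion on the remaining lines: emit one slice per cut point
def split_into_contigs_alt (lines : List String) : List (List String) :=
  match lines with
  | [] => []
  | x :: rest =>
    let j := pvScan rest
    (x :: rest.take j) :: split_into_contigs_alt (rest.drop j)
termination_by lines.length
decreasing_by simp

-- ===== PRECONDITION & SPEC =====
def Spec_split_into_contigs (lines : List String) (out : List (List String)) : Prop := out = split_into_contigs_alt lines
instance (lines : List String) (out : List (List String)) : Decidable (Spec_split_into_contigs lines out) := by unfold Spec_split_into_contigs; infer_instance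

-- ===== CLAIM (what is proved, stated in full; the proofs are below) =====
def Claim_equal_split_into_contigs : Prop := ∀ (lines : List String), Dom_split_into_contigs lines → Spec_split_into_contigs lines (split_into_contigs lines)

-- ===== LEMMAS AND PROOFS =====

def pvIsL (s : String) : Bool := PySem.Str.startswith s "LOCUS"

lemma pvScan_take_drop (ys : List String) :
    ys.take (pvScan ys) = ys.takeWhile (fun y => !pvIsL y) ∧
    ys.drop (pvScan ys) = ys.dropWhile (fun y => !pvIsL y) := by
  induction ys with
  | nil => simp [pvScan]
  | cons y ys ih =>
    by_cases h : pvIsL y = true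
    · simp [pvScan, pvIsL] at h ⊢
      simp [h, List.takeWhile, List.dropWhile]
    · simp [pvIsL] at h
      simp [pvScan, pvIsL, h, List.takeWhile, List.dropWhile, ih.1, ih.2]

-- the accumulator distributes out of A's fold
lemma pvFold_acc (xs : List String) : ∀ (acc : List (List String)) (cur : List String),
    xs.foldl pvStepA (acc, cur) =
      (acc ++ (xs.foldl pvStepA ([], cur)).1, (xs.foldl pvStepA ([], cur)).2) := by
  induction xs with
  | nil => intro acc cur; simp
  | cons x xs ih =>
    intro acc cur
    by_cases h : (PySem.Str.startswith x "LOCUS" && !cur.isEmpty) = true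
    · simp only [List.foldl_cons, pvStepA, h, if_pos, List.nil_append]
      rw [ih (acc ++ [cur]) [x], ih [cur] [x]]
      simp
    · simp only [List.foldl_cons, pvStepA, h, if_neg, Bool.false_eq_true, not_false_iff]
      exact ih acc (cur ++ [x])

-- main invariant: finishing A's fold from a nonempty current contig yields B's shape
lemma pvMain (xs : List String) : ∀ (cur : List String), cur ≠ [] →
    (let st := xs.foldl pvStepA ([], cur)
     if st.2.isEmpty then st.1 else st.1 ++ [st.2]) =
      (cur ++ xs.takeWhile (fun y => !pvIsL y)) ::
        split_into_contigs_alt (xs.dropWhile (fun y => !pvIsL y)) := by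
  induction xs with
  | nil =>
    intro cur hcur
    rw [split_into_contigs_alt.eq_def]
    simp [List.foldl_nil, List.isEmpty_iff, hcur]
  | cons y ys ih =>
    intro cur hcur
    by_cases h : pvIsL y = true
    · have hc : (PySem.Str.startswith y "LOCUS" && !cur.isEmpty) = true := by
        simp [pvIsL] at h
        simp [h, hcur]
      simp only [List.foldl_cons, pvStepA, hc, if_pos, List.nil_append]
      rw [pvFold_acc ys [cur] [y]]
      have ihy := ih [y] (by simp)
      simp only at ihy
      by_cases he : (ys.foldl pvStepA ([], [y])).2.isEmpty = true
      · simp only [he, if_pos] at ihy ⊢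
        rw [List.takeWhile_cons_of_neg (by simp [h]), List.dropWhile_cons_of_neg (by simp [h])]
        rw [ihy]
        conv_rhs => rw [split_into_contigs_alt.eq_def]
        simp [(pvScan_take_drop ys).1, (pvScan_take_drop ys).2]
      · simp only [he, if_neg, Bool.false_eq_true, not_false_iff] at ihy ⊢
        rw [List.takeWhile_cons_of_neg (by simp [h]), List.dropWhile_cons_of_neg (by simp [h])]
        rw [List.append_assoc, ihy]
        conv_rhs => rw [split_into_contigs_alt.eq_def]
        simp [(pvScan_take_drop ys).1, (pvScan_take_drop ys).2]
    · have hc : (PySem.Str.startswith y "LOCUS" && !cur.isEmpty) = false := by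
        simp [pvIsL] at h; simp [h]
      simp only [List.foldl_cons, pvStepA, hc, Bool.false_eq_true, if_neg, not_false_iff]
      rw [ih (cur ++ [y]) (by simp)]
      rw [List.takeWhile_cons_of_pos (by simp [h]), List.dropWhile_cons_of_pos (by simp [h])]
      simp

-- ===== VERDICT (by name: the statement is the Claim_ definition above) =====
theorem split_into_contigs_spec : Claim_equal_split_into_contigs := by
  intro lines _
  unfold Spec_split_into_contigs
  match lines with
  | [] => simp [split_into_contigs, split_into_contigs_alt.eq_def]
  | x :: rest =>
    have h1 : (x :: rest).foldl pvStepA ([], []) = rest.foldl pvStepA ([], [x]) := by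
      simp [pvStepA]
    show split_into_contigs (x :: rest) = _
    simp only [split_into_contigs, h1]
    have := pvMain rest [x] (by simp)
    simp only at this
    rw [this]
    conv_rhs => rw [split_into_contigs_alt.eq_def]
    simp [(pvScan_take_drop rest).1, (pvScan_take_drop rest).2]
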